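-- pv_equiv track=rewrite | github.com/azeez010/Caleb-49ja-main | gameUtils.py | array_vertical
-- ===== SOURCE A (Python) =====
-- def array_vertical(array_2d, num_range):
--     final = []
--     for k in range(num_range):
--         for j in array_2d:
--             try:
--                 final[k] += str(j[k])
--             except Exception:
--                 final.append(str(j[k]))
--     return final
-- ===== SOURCE B (Python) =====
-- def array_vertical(array_2d, num_range):
--     final = []
--     for row in array_2d:
--         for k in range(num_range):
--             s = str(row[k])
--             if k == len(final):
--                 final.append(s)
--             else:
--                 final[k] += s
--     return final
-- ===== Notes on version B (the rewrite author's own statement) =====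
-- stated objective: alternative
-- what changed: B builds the column strings in a single row-major pass (appending on the first row, concatenating in place afterwards) instead of A's column-major pass that re-scans array_2d once per column and drives list growth through a try/except on final[k].
import Mathlib
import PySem

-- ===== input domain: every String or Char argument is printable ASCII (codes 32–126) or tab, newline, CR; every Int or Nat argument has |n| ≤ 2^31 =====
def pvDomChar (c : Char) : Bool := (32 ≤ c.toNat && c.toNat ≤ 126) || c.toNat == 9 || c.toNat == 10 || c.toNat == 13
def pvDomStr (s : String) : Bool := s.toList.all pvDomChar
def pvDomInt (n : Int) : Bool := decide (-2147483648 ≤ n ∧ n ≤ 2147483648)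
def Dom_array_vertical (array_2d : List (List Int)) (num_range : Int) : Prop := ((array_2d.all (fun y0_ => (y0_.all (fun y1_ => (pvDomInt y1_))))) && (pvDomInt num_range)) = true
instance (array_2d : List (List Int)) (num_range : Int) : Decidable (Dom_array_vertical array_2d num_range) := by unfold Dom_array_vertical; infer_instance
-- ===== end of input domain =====

-- B builds the column strings in one row-major pass (append on the first row, in-place concat after),
-- instead of A's column-major pass that re-scans array_2d per column and grows `final` via try/except.


-- ===== PORT A =====
-- try: final[k] += str(j[k])  except: final.append(str(j[k]))
-- (in the except branch Python re-evaluates j[k]; if that itself raises — only outside Pre_ —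
--  the port uses the default of pyGetD, which is never reached inside Pre_)
def stepA (k : Int) (final : List String) (j : List Int) : List String :=
  match PySem.List.pyGet? final k, PySem.List.pyGet? j k with
  | some s, some v => final.set k.toNat (s ++ PySem.Int.toStr v)
  | _, _ => final ++ [PySem.Int.toStr (PySem.List.pyGetD j k 0)]

def array_vertical (array_2d : List (List Int)) (num_range : Int) : List String :=
  (PySem.List.pyRange 0 num_range 1).foldl
    (fun final k => array_2d.foldl (stepA k) final) []

-- ===== PORT B =====
-- s = str(row[k]); if k == len(final): final.append(s) else: final[k] += s
-- (row[k] raises only outside Pre_; there the port uses pyGetD's default)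
def stepB (row : List Int) (final : List String) (k : Int) : List String :=
  let s := PySem.Int.toStr (PySem.List.pyGetD row k 0)
  if k = (final.length : Int) then final ++ [s]
  else final.set k.toNat ((PySem.List.pyGetD final k "") ++ s)

def array_vertical_alt (array_2d : List (List Int)) (num_range : Int) : List String :=
  array_2d.foldl
    (fun final row => (PySem.List.pyRange 0 num_range 1).foldl (stepB row) final) []

-- ===== PRECONDITION & SPEC =====
-- Pre_ excludes exactly the inputs where A raises IndexError: num_range > 0, a nonempty
-- array_2d, and some row shorter than num_range (j[k] is then out of range).
def Pre_array_vertical (array_2d : List (List Int)) (num_range : Int) : Prop :=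
  num_range ≤ 0 ∨ array_2d = [] ∨ ∀ j ∈ array_2d, num_range ≤ (j.length : Int)
instance (array_2d : List (List Int)) (num_range : Int) : Decidable (Pre_array_vertical array_2d num_range) := by unfold Pre_array_vertical; infer_instance

def pvWitness_array_vertical : List (List Int) × Int := ([[1, 2], [3, 4], [5, 6]], 2)

def Spec_array_vertical (array_2d : List (List Int)) (num_range : Int) (out : List String) : Prop := out = array_vertical_alt array_2d num_range
instance (array_2d : List (List Int)) (num_range : Int) (out : List String) : Decidable (Spec_array_vertical array_2d num_range out) := by unfold Spec_array_vertical; infer_instance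

-- ===== CLAIM (what is proved, stated in full; the proofs are below) =====
def Claim_equal_array_vertical : Prop := ∀ (array_2d : List (List Int)) (num_range : Int), Dom_array_vertical array_2d num_range → Pre_array_vertical array_2d num_range → Spec_array_vertical array_2d num_range (array_vertical array_2d num_range)

-- ===== LEMMAS AND PROOFS =====

-- the common value: one concatenated string per column
def colStr (rows : List (List Int)) (k : Nat) : String :=
  rows.foldl (fun acc j => acc ++ PySem.Int.toStr (PySem.List.pyGetD j (k : Int) 0)) ""

theorem foldl_id {α β : Type} (l : List α) (init : β) :
    l.foldl (fun s _ => s) init = init := by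
  induction l generalizing init with
  | nil => rfl
  | cons x xs ih => simp [ih]

-- B, one row that is appended column-by-column (k always equals len(final))
theorem growB (row : List Int) (N : Nat) : ∀ (a b : Int) (F : List String),
    (F.length : Int) = a → (b - a).toNat = N →
    (PySem.List.pyRange a b 1).foldl (stepB row) F
      = F ++ (PySem.List.pyRange a b 1).map
          (fun k => PySem.Int.toStr (PySem.List.pyGetD row k 0)) := by
  induction N with
  | zero =>
    intro a b F hF h
    rw [PySem.List.pyRange_one_eq_nil (by omega)]
    simp
  | succ N ih =>
    intro a b F hF h
    rw [PySem.List.pyRange_one_cons (by omega)]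
    simp only [List.foldl_cons, List.map_cons]
    have hstep : stepB row F a = F ++ [PySem.Int.toStr (PySem.List.pyGetD row a 0)] := by
      unfold stepB
      simp [hF]
    rw [hstep, ih (a + 1) b _ (by simp; omega) (by omega)]
    simp

-- B, updating an existing list of nn columns with one row
theorem updateB (row : List Int) (nn : Nat) (G : Nat → String) :
    ∀ m : Nat, m ≤ nn →
    (PySem.List.pyRange 0 (m : Int) 1).foldl (stepB row) ((List.range nn).map G)
      = (List.range nn).map
          (fun k => if k < m then G k ++ PySem.Int.toStr (PySem.List.pyGetD row (k : Int) 0) else G k) := by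
  intro m
  induction m with
  | zero =>
    intro _
    rw [PySem.List.pyRange_one_eq_nil (by omega)]
    simp
  | succ m ih =>
    intro hm
    have hm' : m ≤ nn := by omega
    have hc : ((m + 1 : Nat) : Int) = (m : Int) + 1 := by push_cast; ring
    rw [hc, PySem.List.pyRange_one_succ_right (by positivity), List.foldl_append, ih hm']
    simp only [List.foldl_cons, List.foldl_nil]
    set Hm : Nat → String := fun k => if k < m then G k ++ PySem.Int.toStr (PySem.List.pyGetD row (k : Int) 0) else G k with hHm
    have hlen : (((List.range nn).map Hm).length : Int) = (nn : Int) := by simp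
    have hmn : m < nn := by omega
    unfold stepB
    rw [hlen, if_neg (by omega)]
    have hget : PySem.List.pyGetD ((List.range nn).map Hm) ((m : Nat) : Int) "" = Hm m := by
      rw [PySem.List.pyGetD_natCast]
      simp [List.getD, hmn]
    rw [hget]
    apply List.ext_getElem
    · simp
    · intro i h1 h2
      simp only [List.getElem_set, List.getElem_map, List.getElem_range] at *
      have hit : ((m : Int)).toNat = m := by omega
      rw [hit]
      by_cases hi : m = i
      · subst hi
        rw [if_pos rfl, hHm]
        simp
      · rw [if_neg hi]
        by_cases hlt : i < m
        · simp only [hHm]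
          rw [if_pos hlt, if_pos (by omega)]
        · simp only [hHm]
          rw [if_neg hlt, if_neg (by omega)]

-- B, outer loop over the remaining rows
theorem outerB (nn : Nat) : ∀ (rs : List (List Int)) (G : Nat → String),
    rs.foldl (fun final row => (PySem.List.pyRange 0 (nn : Int) 1).foldl (stepB row) final)
        ((List.range nn).map G)
      = (List.range nn).map
          (fun (k : Nat) => rs.foldl (fun acc j => acc ++ PySem.Int.toStr (PySem.List.pyGetD j (k : Int) 0)) (G k)) := by
  intro rs
  induction rs with
  | nil => intro G; simp
  | cons r rs ih =>
    intro G
    simp only [List.foldl_cons]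
    rw [updateB r nn G nn le_rfl]
    rw [show (List.range nn).map (fun (k : Nat) => if k < nn then G k ++ PySem.Int.toStr (PySem.List.pyGetD r (k : Int) 0) else G k)
          = (List.range nn).map (fun (k : Nat) => G k ++ PySem.Int.toStr (PySem.List.pyGetD r (k : Int) 0)) from by
      apply List.map_congr_left; intro k hk; simp at hk; simp [hk]]
    exact ih (fun (k : Nat) => G k ++ PySem.Int.toStr (PySem.List.pyGetD r (k : Int) 0))

theorem B_correct (rows : List (List Int)) (n : Int) (hne : rows ≠ []) :
    array_vertical_alt rows n = (List.range n.toNat).map (colStr rows) := by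
  match rows, hne with
  | r :: rs, _ =>
    by_cases hn : n ≤ 0
    · unfold array_vertical_alt
      rw [PySem.List.pyRange_one_eq_nil (by omega)]
      simp only [List.foldl_nil, foldl_id]
      rw [show n.toNat = 0 by omega]
      simp
    · have hcast : n = ((n.toNat : Nat) : Int) := by omega
      unfold array_vertical_alt colStr
      simp only [List.foldl_cons]
      rw [hcast, growB r (n.toNat) 0 (n.toNat : Int) [] (by simp) (by omega)]
      rw [show (PySem.List.pyRange 0 ((n.toNat : Nat) : Int) 1).map
              (fun k : Int => PySem.Int.toStr (PySem.List.pyGetD r k 0))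
            = (List.range n.toNat).map (fun k : Nat => PySem.Int.toStr (PySem.List.pyGetD r (k : Int) 0)) from by
        rw [PySem.List.pyRange_one]
        rw [show ((n.toNat : Int) - 0 = (n.toNat : Int)) from by ring]
        simp only [Int.toNat_natCast, List.map_map]
        apply List.map_congr_left
        intro k _; simp]
      simp only [List.nil_append]
      rw [outerB n.toNat rs (fun (k : Nat) => PySem.Int.toStr (PySem.List.pyGetD r (k : Int) 0))]
      apply List.map_congr_left
      intro k hk
      simp

-- A, one column over the tail rows (final[k] already exists)
theorem innerA (kk : Nat) : ∀ (js : List (List Int)) (F : List String) (s : String),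
    F.length = kk → (∀ j ∈ js, kk < j.length) →
    js.foldl (stepA (kk : Int)) (F ++ [s])
      = F ++ [js.foldl (fun acc j => acc ++ PySem.Int.toStr (PySem.List.pyGetD j (kk : Int) 0)) s] := by
  intro js
  induction js with
  | nil => intro F s hF _; simp
  | cons j js ih =>
    intro F s hF hjs
    simp only [List.foldl_cons]
    have h1 : PySem.List.pyGet? (F ++ [s]) (kk : Int) = some s := by
      rw [← hF]
      exact PySem.List.pyGet?_append_length F [] s
    have hj : kk < j.length := hjs j (List.mem_cons_self ..)
    have h2 : PySem.List.pyGet? j (kk : Int) = some j[kk] := PySem.List.pyGet?_ofNat j kk hj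
    have hstep : stepA (kk : Int) (F ++ [s]) j = F ++ [s ++ PySem.Int.toStr j[kk]] := by
      unfold stepA
      rw [h1, h2]
      simp only [Int.toNat_natCast]
      rw [List.set_append]
      simp [hF]
    rw [hstep, ih F _ hF (fun j hj => hjs j (List.mem_cons_of_mem _ hj))]
    rw [PySem.List.pyGetD_ofNat j kk 0 hj]

-- A, one full column
theorem colA (rows : List (List Int)) (kk : Nat) (F : List String) (hne : rows ≠ [])
    (hF : F.length = kk) (hrows : ∀ j ∈ rows, kk < j.length) :
    rows.foldl (stepA (kk : Int)) F = F ++ [colStr rows kk] := by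
  match rows, hne with
  | j :: js, _ =>
    simp only [List.foldl_cons]
    have hj : kk < j.length := hrows j (List.mem_cons_self ..)
    have h1 : PySem.List.pyGet? F (kk : Int) = none := by
      rw [PySem.List.pyGet?_natCast]
      simp [hF]
    have hstep : stepA (kk : Int) F j = F ++ [PySem.Int.toStr (PySem.List.pyGetD j (kk : Int) 0)] := by
      unfold stepA
      rw [h1]
    rw [hstep, innerA kk js F _ hF (fun j hj => hrows j (List.mem_cons_of_mem _ hj))]
    unfold colStr
    simp

-- A, outer loop over columns
theorem outerA (rows : List (List Int)) (hne : rows ≠ []) :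
    ∀ m : Nat, (∀ j ∈ rows, m ≤ j.length) →
    (PySem.List.pyRange 0 (m : Int) 1).foldl (fun final k => rows.foldl (stepA k) final) []
      = (List.range m).map (colStr rows) := by
  intro m
  induction m with
  | zero =>
    intro _
    rw [PySem.List.pyRange_one_eq_nil (by omega)]
    simp
  | succ m ih =>
    intro hrows
    have hc : ((m + 1 : Nat) : Int) = (m : Int) + 1 := by push_cast; ring
    rw [hc, PySem.List.pyRange_one_succ_right (by positivity), List.foldl_append,
       ih (fun j hj => by have := hrows j hj; omega)]
    simp only [List.foldl_cons, List.foldl_nil]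
    rw [colA rows m ((List.range m).map (colStr rows)) hne (by simp)
        (fun j hj => by have := hrows j hj; omega)]
    rw [List.range_succ, List.map_append]
    simp

theorem A_correct (rows : List (List Int)) (n : Int) (hne : rows ≠ [])
    (hrows : ∀ j ∈ rows, n ≤ (j.length : Int)) :
    array_vertical rows n = (List.range n.toNat).map (colStr rows) := by
  by_cases hn : n ≤ 0
  · unfold array_vertical
    rw [PySem.List.pyRange_one_eq_nil (by omega)]
    rw [show n.toNat = 0 by omega]
    simp
  · have hcast : n = ((n.toNat : Nat) : Int) := by omega
    unfold array_vertical
    rw [hcast]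
    exact outerA rows hne n.toNat (fun j hj => by have := hrows j hj; omega)

-- ===== VERDICT (by name: the statement is the Claim_ definition above) =====
theorem array_vertical_spec : Claim_equal_array_vertical := by
  intro rows n _ hpre
  unfold Spec_array_vertical
  by_cases hne : rows = []
  · subst hne
    unfold array_vertical array_vertical_alt
    simp only [List.foldl_nil, foldl_id]
  · by_cases hn : n ≤ 0
    · unfold array_vertical array_vertical_alt
      rw [PySem.List.pyRange_one_eq_nil (by omega)]
      simp only [List.foldl_nil, foldl_id]
    · have hrows : ∀ j ∈ rows, n ≤ (j.length : Int) := by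
        rcases hpre with h | h | h
        · omega
        · exact absurd h hne
        · exact h
      rw [A_correct rows n hne hrows, B_correct rows n hne]
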